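-- pv_equiv track=rewrite | github.com/MonikaChris/advent-code | dec-2025/Day1/day1.py | safeDial
-- ===== SOURCE A (Python) =====
-- def safeDial(input):
--   zerosCount = 0
--   start = 50
--   for value in input:
--     num = int(value[1:]) * -1 if value[0] == "L" else int(value[1:])
--     start = (start + num)%100
--     if start == 0:
--       zerosCount += 1
--   return zerosCount
-- ===== SOURCE B (Python) =====
-- def safeDial(input):
--   # Divide and conquer: for each half compute (segment total mod 100, histogram of
--   # nonempty prefix-sum residues mod 100); merge by shifting the right histogram by
--   # the left total. The dial hits 0 exactly when a prefix sum is ≡ 50 (mod 100),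
--   # since it starts at 50, so the answer is the root histogram's entry at 50.
--   deltas = [-int(v[1:]) if v[0] == "L" else int(v[1:]) for v in input]
--
--   def solve(d):
--     if not d:
--       return 0, [0] * 100
--     if len(d) == 1:
--       r = d[0] % 100
--       h = [0] * 100
--       h[r] = 1
--       return r, h
--     mid = len(d) // 2
--     tl, hl = solve(d[:mid])
--     tr, hr = solve(d[mid:])
--     return (tl + tr) % 100, [hl[r] + hr[(r - tl) % 100] for r in range(100)]
--
--   return solve(deltas)[1][50]
-- ===== Notes on version B (the rewrite author's own statement) =====
-- stated objective: alternative
-- what changed: A's fused running-position loop is replaced by a divide-and-conquer: each half yields (segment total mod 100, histogram of nonempty prefix-sum residues mod 100), halves merge by shifting the right histogram by the left total, and the answer is the root histogram's entry at residue 50 (position 0 iff prefix sum ≡ 50 mod 100, since the dial starts at 50).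
import Mathlib
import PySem

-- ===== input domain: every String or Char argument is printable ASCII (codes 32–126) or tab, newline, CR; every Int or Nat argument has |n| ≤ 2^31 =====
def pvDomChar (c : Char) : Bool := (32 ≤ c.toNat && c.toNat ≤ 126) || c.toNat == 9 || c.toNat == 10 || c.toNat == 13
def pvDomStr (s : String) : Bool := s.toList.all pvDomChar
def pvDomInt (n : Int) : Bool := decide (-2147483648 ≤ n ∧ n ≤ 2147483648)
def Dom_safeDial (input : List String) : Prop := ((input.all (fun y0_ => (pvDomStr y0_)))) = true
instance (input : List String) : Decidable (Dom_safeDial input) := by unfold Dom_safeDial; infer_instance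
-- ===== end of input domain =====

-- B replaces A's fused running-position loop by a divide-and-conquer over segments
-- (segment total mod 100 + histogram of prefix-sum residues, merged by shifting);
-- alternative decomposition, not claimed faster.

-- ===== PORT A =====
-- one iteration of A's loop; state = (zerosCount, start)
def safeDialStep (st : Int × Int) (value : String) : Int × Int :=
  let num : Int :=
    if PySem.Str.pyGet? value 0 = some 'L' then
      (PySem.Int.ofStr? (PySem.Str.slice value (some 1) none)).getD 0 * (-1)
    else
      (PySem.Int.ofStr? (PySem.Str.slice value (some 1) none)).getD 0
  let start := PySem.Int.mod (st.2 + num) 100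
  (if start = 0 then st.1 + 1 else st.1, start)

def safeDial (input : List String) : Int :=
  (input.foldl safeDialStep (0, 50)).1

-- ===== PORT B =====
-- signed delta of one instruction: -int(v[1:]) if v[0]=='L' else int(v[1:])
def altDelta (v : String) : Int :=
  if PySem.Str.pyGet? v 0 = some 'L' then
    -((PySem.Int.ofStr? (PySem.Str.slice v (some 1) none)).getD 0)
  else
    (PySem.Int.ofStr? (PySem.Str.slice v (some 1) none)).getD 0

-- B's solve(d): divide and conquer producing (total mod 100, residue histogram);
-- d[:mid] / d[mid:] are ported as take/drop (= PySem.List.slice with natural bounds).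
def altSolve : List Int → Int × List Int
  | [] => (0, List.replicate 100 0)
  | [x] =>
      let r := PySem.Int.mod x 100
      (r, (List.replicate 100 (0 : Int)).set r.toNat 1)
  | x :: y :: rest =>
      let mid := (x :: y :: rest).length / 2
      let L := altSolve ((x :: y :: rest).take mid)
      let R := altSolve ((x :: y :: rest).drop mid)
      (PySem.Int.mod (L.1 + R.1) 100,
       (List.range 100).map (fun (r : Nat) =>
         (PySem.List.pyGet? L.2 ((r : Nat) : Int)).getD 0 +
         (PySem.List.pyGet? R.2 (PySem.Int.mod (((r : Nat) : Int) - L.1) 100)).getD 0))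
termination_by d => d.length
decreasing_by
  · simp; omega
  · simp; omega

def safeDial_alt (input : List String) : Int :=
  let deltas := input.map altDelta
  (PySem.List.pyGet? (altSolve deltas).2 50).getD 0

-- ===== PRECONDITION & SPEC =====
-- Pre_ excludes exactly the inputs on which Python A raises: an empty instruction
-- (IndexError on value[0]) or a tail value[1:] that is not a valid int literal (ValueError).
def Pre_safeDial (input : List String) : Prop :=
  (input.all (fun v =>
    (PySem.Int.ofChars? (v.toList.drop 1)).isSome && !(v.toList.isEmpty))) = true

instance (input : List String) : Decidable (Pre_safeDial input) := by
  unfold Pre_safeDial; infer_instance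

def pvWitness_safeDial : List String := ["L10", "R60"]

def Spec_safeDial (input : List String) (out : Int) : Prop := out = safeDial_alt input
instance (input : List String) (out : Int) : Decidable (Spec_safeDial input out) := by
  unfold Spec_safeDial; infer_instance

-- ===== CLAIM (what is proved, stated in full; the proofs are below) =====
def Claim_equal_safeDial : Prop :=
  ∀ (input : List String), Dom_safeDial input → Pre_safeDial input →
    Spec_safeDial input (safeDial input)

-- ===== LEMMAS AND PROOFS =====

-- nonempty prefix sums of a delta list (proof-side characterisation of B's histogram)
def pvPsums : List Int → List Int
  | [] => []
  | x :: xs => x :: (pvPsums xs).map (x + ·)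

-- the histogram B's solve computes: entry r = #(nonempty prefixes with sum ≡ r mod 100)
def pvHist (d : List Int) : List Int :=
  (List.range 100).map (fun (r : Nat) => ((pvPsums d).countP (fun p => p % 100 = ((r : Nat) : Int)) : Int))

lemma pvPsums_append (l m : List Int) :
    pvPsums (l ++ m) = pvPsums l ++ (pvPsums m).map (l.sum + ·) := by
  induction l with
  | nil => simp [pvPsums]
  | cons x xs ih =>
      simp only [List.cons_append, pvPsums, ih, List.map_append, List.map_map]
      simp [add_assoc]

lemma pvHist_len (d : List Int) : (pvHist d).length = 100 := by simp [pvHist]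

lemma pvHist_get (d : List Int) (i : Nat) (h : i < 100) :
    (pvHist d)[i]'(by simp [pvHist_len, h]) =
      ((pvPsums d).countP (fun p => p % 100 = (i : Int)) : Int) := by
  unfold pvHist
  rw [List.getElem_map]
  simp

lemma altSolve_eq (d : List Int) : altSolve d = (d.sum % 100, pvHist d) := by
  have H : ∀ (n : Nat) (d : List Int), d.length = n → altSolve d = (d.sum % 100, pvHist d) := by
    intro n
    induction n using Nat.strong_induction_on with
    | _ n ih =>
      intro d hd
      match d with
      | [] =>
          have h2 : pvHist [] = List.replicate 100 0 := by
            apply List.ext_getElem (by simp [pvHist_len])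
            intro i h1 _
            rw [pvHist_get _ _ (by simpa [pvHist_len] using h1), List.getElem_replicate]
            simp [pvPsums]
          rw [altSolve, h2]
          simp
      | [x] =>
          have hm : PySem.Int.mod x 100 = x % 100 :=
            PySem.Int.mod_eq_emod_of_pos (by norm_num)
          have h0 : 0 ≤ x % 100 := Int.emod_nonneg x (by norm_num)
          have h1 : x % 100 < 100 := Int.emod_lt_of_pos x (by norm_num)
          have h2 : pvHist [x] = (List.replicate 100 (0 : Int)).set (x % 100).toNat 1 := by
            apply List.ext_getElem (by simp [pvHist_len])
            intro i hl _
            have hi : i < 100 := by simpa [pvHist_len] using hl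
            rw [pvHist_get _ _ hi, List.getElem_set]
            by_cases hc : (x % 100).toNat = i
            · have hx : x % 100 = (i : Int) := by omega
              rw [if_pos hc]
              simp [pvPsums, hx]
            · have hx : ¬ x % 100 = (i : Int) := by omega
              rw [if_neg hc, List.getElem_replicate]
              simp [pvPsums, hx]
          rw [altSolve, hm, h2]
          simp
      | x :: y :: rest =>
          rw [altSolve]
          set dl := x :: y :: rest with hdl
          set mid := dl.length / 2 with hmid
          have hlen : dl.length = n := hd
          have hmid1 : 1 ≤ mid := by simp [hmid, hdl]; omega
          have hmidlt : mid < dl.length := by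
            have : 2 ≤ dl.length := by simp [hdl]
            omega
          have ihL := ih (dl.take mid).length
            (by simp [List.length_take]; omega) (dl.take mid) rfl
          have ihR := ih (dl.drop mid).length
            (by simp [List.length_drop]; omega) (dl.drop mid) rfl
          rw [ihL, ihR]
          dsimp only
          have hsplit : dl.take mid ++ dl.drop mid = dl := List.take_append_drop _ _
          have hsum : (dl.take mid).sum + (dl.drop mid).sum = dl.sum := by
            conv_rhs => rw [← hsplit]
            simp
          refine Prod.ext ?_ ?_
          · show PySem.Int.mod ((dl.take mid).sum % 100 + (dl.drop mid).sum % 100) 100 = dl.sum % 100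
            rw [PySem.Int.mod_eq_emod_of_pos (by norm_num)]
            omega
          · dsimp only
            apply List.ext_getElem (by simp [pvHist_len])
            intro i h1 _
            have hi : i < 100 := by simpa using h1
            rw [pvHist_get _ _ hi]
            simp only [List.getElem_map, List.getElem_range]
            have hL : (PySem.List.pyGet? (pvHist (dl.take mid)) ((i : Int))).getD 0 =
                (((pvPsums (dl.take mid)).countP (fun p => p % 100 = (i : Int))) : Int) := by
              rw [PySem.List.pyGet?_natCast]
              rw [List.getElem?_eq_getElem (by rw [pvHist_len]; exact hi)]
              simp [pvHist_get _ _ hi]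
            have hs0 : 0 ≤ PySem.Int.mod ((i : Int) - (dl.take mid).sum % 100) 100 := by
              rw [PySem.Int.mod_eq_emod_of_pos (by norm_num)]
              exact Int.emod_nonneg _ (by norm_num)
            have hs1 : PySem.Int.mod ((i : Int) - (dl.take mid).sum % 100) 100 < 100 := by
              rw [PySem.Int.mod_eq_emod_of_pos (by norm_num)]
              exact Int.emod_lt_of_pos _ (by norm_num)
            have hR : (PySem.List.pyGet? (pvHist (dl.drop mid))
                  (PySem.Int.mod ((i : Int) - (dl.take mid).sum % 100) 100)).getD 0 =
                (((pvPsums (dl.drop mid)).countP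
                  (fun p => p % 100 = ((i : Int) - (dl.take mid).sum) % 100)) : Int) := by
              rw [PySem.List.pyGet?_of_nonneg _ hs0]
              have hlt : (PySem.Int.mod ((i : Int) - (dl.take mid).sum % 100) 100).toNat < 100 := by omega
              rw [List.getElem?_eq_getElem (by rw [pvHist_len]; exact hlt)]
              rw [pvHist_get _ _ hlt]
              have hcast : ((PySem.Int.mod ((i : Int) - (dl.take mid).sum % 100) 100).toNat : Int) =
                  ((i : Int) - (dl.take mid).sum) % 100 := by
                rw [PySem.Int.mod_eq_emod_of_pos (by norm_num)] at hs0 hs1 ⊢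
                omega
              rw [hcast]
              rfl
            rw [hL, hR]
            have hcount : (pvPsums dl).countP (fun p => p % 100 = (i : Int)) =
                (pvPsums (dl.take mid)).countP (fun p => p % 100 = (i : Int)) +
                (pvPsums (dl.drop mid)).countP (fun p => p % 100 = ((i : Int) - (dl.take mid).sum) % 100) := by
              conv_lhs => rw [← hsplit]
              rw [pvPsums_append, List.countP_append, List.countP_map]
              congr 1
              apply List.countP_congr
              intro p _
              simp only [Function.comp, decide_eq_true_eq]
              omega
            rw [hcount]
            push_cast
            ring
  exact H d.length d rfl

-- A's loop, started at (c, t % 100), counts prefix sums ≡ 0 (proved once, reused)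
def pvSumsFrom (t : Int) : List String → List Int
  | [] => []
  | v :: rest => (t + altDelta v) :: pvSumsFrom (t + altDelta v) rest

lemma pv_mod_mod_add (t dlt : Int) :
    PySem.Int.mod (PySem.Int.mod t 100 + dlt) 100 = PySem.Int.mod (t + dlt) 100 := by
  have h : ∀ a : Int, PySem.Int.mod a 100 = a % 100 :=
    fun a => PySem.Int.mod_eq_emod_of_pos (by norm_num)
  rw [h, h, h]
  exact Int.emod_add_emod t 100 dlt

lemma pv_afold (l : List String) : ∀ (c t : Int),
    (l.foldl safeDialStep (c, PySem.Int.mod t 100)).1 =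
      c + ((pvSumsFrom t l).countP (fun p => decide (PySem.Int.mod p 100 = 0)) : Int) := by
  induction l with
  | nil => intro c t; simp [pvSumsFrom]
  | cons v rest ih =>
      intro c t
      have hnum : (if PySem.Str.pyGet? v 0 = some 'L' then
            (PySem.Int.ofStr? (PySem.Str.slice v (some 1) none)).getD 0 * (-1)
          else (PySem.Int.ofStr? (PySem.Str.slice v (some 1) none)).getD 0) = altDelta v := by
        unfold altDelta; split_ifs <;> ring
      have hs : safeDialStep (c, PySem.Int.mod t 100) v =
          ((if PySem.Int.mod (t + altDelta v) 100 = 0 then c + 1 else c),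
           PySem.Int.mod (t + altDelta v) 100) := by
        simp only [safeDialStep, hnum, pv_mod_mod_add]
      rw [List.foldl_cons, hs]
      cases h : decide (PySem.Int.mod (t + altDelta v) 100 = 0) with
      | true =>
          rw [if_pos (of_decide_eq_true h), ih]
          have hd : (100 : Int) ∣ t + altDelta v :=
            (PySem.Int.mod_eq_zero_iff_dvd _ _).mp (of_decide_eq_true h)
          simp [pvSumsFrom, hd]
          ring
      | false =>
          rw [if_neg (of_decide_eq_false h), ih]
          have hd : ¬ (100 : Int) ∣ t + altDelta v := fun hdvd =>
            (of_decide_eq_false h) ((PySem.Int.mod_eq_zero_iff_dvd _ _).mpr hdvd)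
          simp [pvSumsFrom, hd]

lemma pvSumsFrom_eq (l : List String) : ∀ t : Int,
    pvSumsFrom t l = (pvPsums (l.map altDelta)).map (t + ·) := by
  induction l with
  | nil => intro t; simp [pvSumsFrom, pvPsums]
  | cons v rest ih =>
      intro t
      simp only [pvSumsFrom, List.map_cons, pvPsums, ih, List.map_map]
      congr 1
      apply List.map_congr_left
      intro p _
      simp [Function.comp]
      ring

-- ===== VERDICT (by name: the statement is the Claim_ definition above) =====
theorem safeDial_spec : Claim_equal_safeDial := by
  intro input _ _
  unfold Spec_safeDial safeDial safeDial_alt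
  show (input.foldl safeDialStep (0, 50)).1 =
    (PySem.List.pyGet? (altSolve (input.map altDelta)).2 50).getD 0
  have hA : (input.foldl safeDialStep (0, (50 : Int))).1 =
      (((pvPsums (input.map altDelta)).countP
        (fun p => p % 100 = ((50 : Nat) : Int))) : Int) := by
    have h50 : (0 : Int × Int).2 = 0 := rfl
    have h50' : ((0 : Int), (50 : Int)) = (0, PySem.Int.mod 50 100) := by decide
    rw [h50', pv_afold input 0 50, pvSumsFrom_eq]
    rw [List.countP_map]
    have hc : ∀ p ∈ pvPsums (input.map altDelta),
        ((fun p => decide (PySem.Int.mod p 100 = 0)) ∘ ((50 : Int) + ·)) p = true ↔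
        (fun p => decide (p % 100 = ((50 : Nat) : Int))) p = true := by
      intro p _
      simp only [Function.comp, decide_eq_true_eq]
      rw [PySem.Int.mod_eq_emod_of_pos (by norm_num)]
      omega
    rw [List.countP_congr hc]
    simp
  have hB : (PySem.List.pyGet? (altSolve (input.map altDelta)).2 50).getD 0 =
      (((pvPsums (input.map altDelta)).countP
        (fun p => p % 100 = ((50 : Nat) : Int))) : Int) := by
    rw [altSolve_eq]
    show (PySem.List.pyGet? (pvHist (input.map altDelta)) ((50 : Nat) : Int)).getD 0 = _
    rw [PySem.List.pyGet?_natCast]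
    rw [List.getElem?_eq_getElem (by rw [pvHist_len]; norm_num)]
    simp [pvHist_get _ 50 (by norm_num)]
  rw [hA, hB]
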